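-- pv_equiv track=rewrite | github.com/TUkan74/Python | Python/python/algoritmizacia/variacie.py | variace
-- ===== SOURCE A (Python) =====
-- def variace(k,n):
--     def var(i):
--
--       for j in range(1,n+1):
--         v[i] = j
--         if i< k-1:
--             var(i+1)
--         else:
--             vysledok.append(v[:])
--     v = [0] *k
--     vysledok = []
--     var(0)
--     return vysledok
-- ===== SOURCE B (Python) =====
-- def variace(k, n):
--     if k <= 0:
--         return []
--     result = [[]]
--     for _ in range(k):
--         result = [t + [j] for t in result for j in range(1, n + 1)]
--     return result
-- ===== Notes on version B (the rewrite author's own statement) =====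
-- stated objective: alternative
-- what changed: Replaces the recursive in-place backtracking writer (mutating a shared buffer v and an outer result list) by an iterative layer-building construction: start from [[]] and k times extend every tuple by each j in 1..n.
import Mathlib
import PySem

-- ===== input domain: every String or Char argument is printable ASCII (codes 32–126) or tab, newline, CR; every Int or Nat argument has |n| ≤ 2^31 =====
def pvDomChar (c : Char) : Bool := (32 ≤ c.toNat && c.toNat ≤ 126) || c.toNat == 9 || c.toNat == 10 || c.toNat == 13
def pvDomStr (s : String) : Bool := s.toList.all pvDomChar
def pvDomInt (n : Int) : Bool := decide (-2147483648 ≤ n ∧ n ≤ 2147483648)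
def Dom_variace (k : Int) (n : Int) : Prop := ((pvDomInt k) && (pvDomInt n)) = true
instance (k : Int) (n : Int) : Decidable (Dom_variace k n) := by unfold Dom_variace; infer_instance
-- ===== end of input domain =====

-- B builds the result iteratively layer by layer instead of A's recursive in-place backtracking; return values agree on Pre_ (A raises IndexError when k ≤ 0 and n ≥ 1).

-- ===== PORT A =====
-- inner recursive 'var(i)': state is (v, vysledok); fuel bounds the recursion depth (k suffices)
def varA (n km1 : Int) (fuel : Nat) (i : Int) (v : List Int) (acc : List (List Int)) :
    List Int × List (List Int) :=
  (PySem.List.pyRange 1 (n + 1) 1).foldl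
    (fun st j =>
      let v' := st.1.set i.toNat j          -- v[i] = j  (i is always in range on Pre_)
      if i < km1 then
        match fuel with
        | 0 => (v', st.2)                    -- unreachable when fuel ≥ k - 1 - i
        | f + 1 => varA n km1 f (i + 1) v' st.2
      else (v', st.2 ++ [v']))               -- vysledok.append(v[:])
    (v, acc)

def variace (k : Int) (n : Int) : List (List Int) :=
  (varA n (k - 1) k.toNat 0 (List.replicate k.toNat 0) []).2

-- ===== PORT B =====
def variace_alt (k : Int) (n : Int) : List (List Int) :=
  if k ≤ 0 then []
  else
    (List.range k.toNat).foldl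
      (fun res _ =>
        res.flatMap (fun t => (PySem.List.pyRange 1 (n + 1) 1).map (fun j => t ++ [j])))
      [[]]

-- ===== PRECONDITION & SPEC =====
-- Pre_ excludes exactly k ≤ 0 ∧ n ≥ 1, where A raises IndexError (v[0]=j on the empty buffer).
def Pre_variace (k : Int) (n : Int) : Prop := 1 ≤ k ∨ n ≤ 0
instance (k : Int) (n : Int) : Decidable (Pre_variace k n) := by unfold Pre_variace; infer_instance
def pvWitness_variace : Int × Int := (2, 2)

def Spec_variace (k : Int) (n : Int) (out : List (List Int)) : Prop := out = variace_alt k n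
instance (k : Int) (n : Int) (out : List (List Int)) : Decidable (Spec_variace k n out) := by unfold Spec_variace; infer_instance

-- ===== CLAIM (what is proved, stated in full; the proofs are below) =====
def Claim_equal_variace : Prop := ∀ (k : Int) (n : Int), Dom_variace k n → Pre_variace k n → Spec_variace k n (variace k n)

-- ===== LEMMAS AND PROOFS =====

-- all d-tuples over 1..n, lexicographic, last coordinate fastest (prepend form)
def tuples (n : Int) : Nat → List (List Int)
  | 0 => [[]]
  | d + 1 => (PySem.List.pyRange 1 (n + 1) 1).flatMap (fun j => (tuples n d).map (fun s => j :: s))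

-- snoc characterization: extending every tuple at the END by each j is the next layer
lemma tuples_snoc (n : Int) (d : Nat) :
    tuples n (d + 1) =
      (tuples n d).flatMap (fun t => (PySem.List.pyRange 1 (n + 1) 1).map (fun j => t ++ [j])) := by
  induction d with
  | zero => rw [tuples, tuples]; simp [tuples, List.map_eq_flatMap]
  | succ d ih =>
    conv_lhs => rw [tuples, ih]
    rw [tuples]
    simp [List.map_flatMap, List.flatMap_map, List.flatMap_assoc, List.map_map,
      Function.comp_def]

-- B's layer loop computes tuples
lemma alt_layers (n : Int) (m : Nat) :
    (List.range m).foldl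
      (fun res _ =>
        res.flatMap (fun t => (PySem.List.pyRange 1 (n + 1) 1).map (fun j => t ++ [j])))
      [[]] = tuples n m := by
  induction m with
  | zero => simp [tuples]
  | succ m ih => rw [List.range_succ, List.foldl_append, ih, List.foldl_cons, List.foldl_nil,
      tuples_snoc]

-- generic inner-fold shape: each step preserves P on the buffer and appends h j
lemma foldl_body (g : (List Int × List (List Int)) → Int → List Int × List (List Int))
    (h : Int → List (List Int)) (P : List Int → Prop)
    (Hg : ∀ v acc j, P v → P (g (v, acc) j).1 ∧ (g (v, acc) j).2 = acc ++ h j) :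
    ∀ (l : List Int) (v : List Int) (acc : List (List Int)), P v →
      P (l.foldl g (v, acc)).1 ∧ (l.foldl g (v, acc)).2 = acc ++ l.flatMap h := by
  intro l
  induction l with
  | nil => intro v acc hv; simpa using hv
  | cons j l ih =>
    intro v acc hv
    have h1 := Hg v acc j hv
    have h2 := ih (g (v, acc) j).1 (g (v, acc) j).2 h1.1
    simp only [List.foldl_cons, List.flatMap_cons]
    constructor
    · exact h2.1
    · rw [h2.2, h1.2, List.append_assoc]

-- characterization of A's recursion
lemma varA_char (n km1 : Int) : ∀ (fuel : Nat) (i : Int) (v : List Int) (acc : List (List Int)),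
    0 ≤ i → i ≤ km1 → (km1 - i).toNat ≤ fuel → v.length = (km1 + 1).toNat →
    (varA n km1 fuel i v acc).1.length = v.length ∧
    (varA n km1 fuel i v acc).1.take i.toNat = v.take i.toNat ∧
    (varA n km1 fuel i v acc).2 =
      acc ++ (tuples n ((km1 - i).toNat + 1)).map (fun s => v.take i.toNat ++ s) := by
  intro fuel
  induction fuel with
  | zero =>
    intro i v acc hi hik hf hv
    have hieq : i = km1 := by omega
    subst hieq
    rw [varA]
    have key := foldl_body
      (fun st j =>
        let v' := st.1.set i.toNat j
        if i < i then
          match (0 : Nat) with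
          | 0 => (v', st.2)
          | f + 1 => varA n i f (i + 1) v' st.2
        else (v', st.2 ++ [v']))
      (fun j => [v.take i.toNat ++ [j]])
      (fun w => w.length = v.length ∧ w.take i.toNat = v.take i.toNat)
      (by
        intro w acc' j hw
        have hlt : i.toNat < w.length := by omega
        have hset : w.set i.toNat j = w.take i.toNat ++ [j] := by
          rw [List.set_eq_take_append_cons_drop, if_pos hlt]
          have : w.drop (i.toNat + 1) = [] := by
            apply List.drop_eq_nil_of_le; omega
          rw [this]
        simp only [lt_self_iff_false, if_false]
        refine ⟨⟨?_, ?_⟩, ?_⟩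
        · simp [hw.1]
        · rw [List.take_set_of_le (le_refl _)]; exact hw.2
        · rw [hset, hw.2])
      (PySem.List.pyRange 1 (n + 1) 1) v acc ⟨rfl, rfl⟩
    refine ⟨key.1.1, key.1.2, ?_⟩
    rw [key.2]
    congr 1
    have : (i - i).toNat + 1 = 1 := by omega
    rw [this, tuples, tuples]
    simp [List.map_flatMap, List.map_eq_flatMap, List.flatMap_assoc, List.map_map,
      Function.comp_def]
  | succ f ihf =>
    intro i v acc hi hik hf hv
    by_cases hcase : i < km1
    · rw [varA]
      have key := foldl_body
        (fun st j =>
          let v' := st.1.set i.toNat j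
          if i < km1 then
            match (f + 1 : Nat) with
            | 0 => (v', st.2)
            | f' + 1 => varA n km1 f' (i + 1) v' st.2
          else (v', st.2 ++ [v']))
        (fun j => (tuples n ((km1 - (i + 1)).toNat + 1)).map
            (fun s => v.take i.toNat ++ j :: s))
        (fun w => w.length = v.length ∧ w.take i.toNat = v.take i.toNat)
        (by
          intro w acc' j hw
          simp only [if_pos hcase]
          have hlt : i.toNat < w.length := by omega
          have hrec := ihf (i + 1) (w.set i.toNat j) acc'
            (by omega) (by omega) (by omega) (by simp; omega)
          have htk1 : (i + 1).toNat = i.toNat + 1 := by omega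
          have hset1 : (w.set i.toNat j).take (i.toNat + 1) = w.take i.toNat ++ [j] := by
            rw [List.set_eq_take_append_cons_drop, if_pos hlt, List.take_append]
            simp [List.length_take, Nat.min_eq_left (le_of_lt hlt), List.take_take]
          refine ⟨⟨?_, ?_⟩, ?_⟩
          · rw [hrec.1]; simp [hw.1]
          · have := hrec.2.1
            rw [htk1] at this
            have h2 : (varA n km1 f (i + 1) (w.set i.toNat j) acc').1.take i.toNat =
                ((varA n km1 f (i + 1) (w.set i.toNat j) acc').1.take (i.toNat + 1)).take i.toNat := by
              rw [List.take_take]; congr 1; omega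
            rw [h2, this, hset1,
              List.take_left' (by simp [List.length_take, Nat.min_eq_left (le_of_lt hlt)])]
            exact hw.2
          · rw [hrec.2.2, htk1, hset1, hw.2]
            congr 1
            simp [List.map_map, Function.comp_def])
        (PySem.List.pyRange 1 (n + 1) 1) v acc ⟨rfl, rfl⟩
      refine ⟨key.1.1, key.1.2, ?_⟩
      rw [key.2]
      congr 1
      have hsub : (km1 - i).toNat = (km1 - (i + 1)).toNat + 1 := by omega
      conv_rhs => rw [hsub, tuples]
      simp [List.map_flatMap, List.map_map, Function.comp_def]
    · -- i = km1: same computation as the fuel-0 case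
      have hieq : i = km1 := by omega
      subst hieq
      rw [varA]
      have key := foldl_body
        (fun st j =>
          let v' := st.1.set i.toNat j
          if i < i then
            match (f + 1 : Nat) with
            | 0 => (v', st.2)
            | f' + 1 => varA n i f' (i + 1) v' st.2
          else (v', st.2 ++ [v']))
        (fun j => [v.take i.toNat ++ [j]])
        (fun w => w.length = v.length ∧ w.take i.toNat = v.take i.toNat)
        (by
          intro w acc' j hw
          have hlt : i.toNat < w.length := by omega
          have hset : w.set i.toNat j = w.take i.toNat ++ [j] := by
            rw [List.set_eq_take_append_cons_drop, if_pos hlt]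
            have : w.drop (i.toNat + 1) = [] := by
              apply List.drop_eq_nil_of_le; omega
            rw [this]
          simp only [lt_self_iff_false, if_false]
          refine ⟨⟨?_, ?_⟩, ?_⟩
          · simp [hw.1]
          · rw [List.take_set_of_le (le_refl _)]; exact hw.2
          · rw [hset, hw.2])
        (PySem.List.pyRange 1 (n + 1) 1) v acc ⟨rfl, rfl⟩
      refine ⟨key.1.1, key.1.2, ?_⟩
      rw [key.2]
      congr 1
      have : (i - i).toNat + 1 = 1 := by omega
      rw [this, tuples, tuples]
      simp [List.map_flatMap, List.map_eq_flatMap, List.flatMap_assoc, List.map_map,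
      Function.comp_def]

lemma pyRange_empty_of_nonpos (n : Int) (hn : n ≤ 0) :
    PySem.List.pyRange 1 (n + 1) 1 = [] := by
  exact PySem.List.pyRange_one_eq_nil (by omega)

-- ===== VERDICT (by name: the statement is the Claim_ definition above) =====
theorem variace_spec : Claim_equal_variace := by
  intro k n _ hpre
  unfold Spec_variace variace variace_alt
  by_cases hk : 1 ≤ k
  · have hchar := varA_char n (k - 1) k.toNat 0 (List.replicate k.toNat 0) []
      (le_refl 0) (by omega) (by omega) (by simp)
    rw [hchar.2.2]
    have hkk : (k - 1 - 0).toNat + 1 = k.toNat := by omega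
    rw [hkk]
    rw [if_neg (by omega), alt_layers]
    simp
  · have hn : n ≤ 0 := by rcases hpre with h | h <;> omega
    rw [if_pos (by omega)]
    rw [varA, pyRange_empty_of_nonpos n hn]
    simp
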